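-- pv_equiv track=rewrite | github.com/HappyBravo/Misc | PatternChallenge/@clcoding/Day14/solDay14.py | generate_square_pattern_without_base
-- ===== SOURCE A (Python) =====
-- def generate_square_pattern_without_base(amplitude, width,
--                                          pattern_icon = '* ', space_icon = '  '):
--     pattern = ""
--     _half_width = width//2
--
--     for i in range(amplitude):
--         isLast = int(i == amplitude-1)
--
--         if i == 0 :
--             pattern += space_icon*(_half_width-2) + \
--                        pattern_icon * (_half_width+1) +\
--                        space_icon*(_half_width-2) + \
--                        "\n"
--         else:
--             pattern += space_icon*((_half_width-2)*(1-isLast)) + \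
--                        pattern_icon * (1 + (_half_width-2)*(isLast)) + \
--                        space_icon * (_half_width-1) + \
--                        pattern_icon * (1 + (_half_width-2)*(isLast)) + \
--                        space_icon*((_half_width-2)*(1-isLast)) + \
--                        "\n"
--
--     return pattern
-- ===== SOURCE B (Python) =====
-- def generate_square_pattern_without_base(amplitude, width,
--                                          pattern_icon = '* ', space_icon = '  '):
--     if amplitude <= 0:
--         return ""
--     h = width // 2
--     top = space_icon*(h-2) + pattern_icon*(h+1) + space_icon*(h-2) + "\n"
--     if amplitude == 1:
--         return top
--     mid = space_icon*(h-2) + pattern_icon + space_icon*(h-1) + pattern_icon + space_icon*(h-2) + "\n"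
--     bot = pattern_icon*(h-1) + space_icon*(h-1) + pattern_icon*(h-1) + "\n"
--     return top + mid*(amplitude-2) + bot
-- ===== Notes on version B (the rewrite author's own statement) =====
-- stated objective: simpler
-- what changed: B eliminates A's per-row loop: it builds the three distinct row strings (top, middle, bottom) once and assembles the result as top + middle*(amplitude-2) + bottom, with the amplitude<=0 and amplitude==1 cases handled directly.
import Mathlib
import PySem

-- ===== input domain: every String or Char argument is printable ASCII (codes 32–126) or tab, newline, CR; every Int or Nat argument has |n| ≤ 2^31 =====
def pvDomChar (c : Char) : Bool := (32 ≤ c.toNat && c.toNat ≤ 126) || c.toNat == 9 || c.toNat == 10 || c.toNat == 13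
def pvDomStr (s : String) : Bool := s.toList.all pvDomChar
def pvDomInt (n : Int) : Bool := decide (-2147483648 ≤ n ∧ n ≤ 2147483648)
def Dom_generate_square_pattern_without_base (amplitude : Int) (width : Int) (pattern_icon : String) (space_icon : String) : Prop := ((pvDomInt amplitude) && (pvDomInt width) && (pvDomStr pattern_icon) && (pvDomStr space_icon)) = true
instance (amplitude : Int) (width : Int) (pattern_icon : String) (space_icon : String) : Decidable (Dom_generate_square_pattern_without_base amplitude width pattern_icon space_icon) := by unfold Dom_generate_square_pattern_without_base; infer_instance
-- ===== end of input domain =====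

-- B replaces A's per-row loop by building the three distinct row strings once and
-- assembling top + middle*(amplitude-2) + bottom (objective: simpler).

-- Python string repetition s * n (empty for n ≤ 0); shared primitive of both ports.
def pvRep (s : String) (n : Int) : String := String.ofList (PySem.List.pyRepeat s.toList n)

-- ===== PORT A =====
-- the body of A's `for i in range(amplitude)` loop
def pvBodyA (amplitude : Int) (hw : Int) (pattern_icon : String) (space_icon : String)
    (pattern : String) (i : Int) : String :=
  let isLast : Int := if i = amplitude - 1 then 1 else 0
  if i = 0 then
    pattern ++ pvRep space_icon (hw - 2) ++ pvRep pattern_icon (hw + 1) ++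
      pvRep space_icon (hw - 2) ++ "\n"
  else
    pattern ++ pvRep space_icon ((hw - 2) * (1 - isLast)) ++
      pvRep pattern_icon (1 + (hw - 2) * isLast) ++
      pvRep space_icon (hw - 1) ++
      pvRep pattern_icon (1 + (hw - 2) * isLast) ++
      pvRep space_icon ((hw - 2) * (1 - isLast)) ++ "\n"

def generate_square_pattern_without_base (amplitude : Int) (width : Int) (pattern_icon : String) (space_icon : String) : String :=
  (PySem.List.pyRange 0 amplitude 1).foldl
    (pvBodyA amplitude (PySem.Int.floordiv width 2) pattern_icon space_icon) ""

-- ===== PORT B =====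
def generate_square_pattern_without_base_alt (amplitude : Int) (width : Int) (pattern_icon : String) (space_icon : String) : String :=
  let h := PySem.Int.floordiv width 2
  let top := pvRep space_icon (h - 2) ++ pvRep pattern_icon (h + 1) ++ pvRep space_icon (h - 2) ++ "\n"
  let mid := pvRep space_icon (h - 2) ++ pattern_icon ++ pvRep space_icon (h - 1) ++
             pattern_icon ++ pvRep space_icon (h - 2) ++ "\n"
  let bot := pvRep pattern_icon (h - 1) ++ pvRep space_icon (h - 1) ++ pvRep pattern_icon (h - 1) ++ "\n"
  if amplitude ≤ 0 then ""
  else if amplitude = 1 then top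
  else top ++ pvRep mid (amplitude - 2) ++ bot

-- ===== PRECONDITION & SPEC =====
def Spec_generate_square_pattern_without_base (amplitude : Int) (width : Int) (pattern_icon : String) (space_icon : String) (out : String) : Prop := out = generate_square_pattern_without_base_alt amplitude width pattern_icon space_icon
instance (amplitude : Int) (width : Int) (pattern_icon : String) (space_icon : String) (out : String) : Decidable (Spec_generate_square_pattern_without_base amplitude width pattern_icon space_icon out) := by unfold Spec_generate_square_pattern_without_base; infer_instance

-- ===== CLAIM (what is proved, stated in full; the proofs are below) =====
def Claim_equal_generate_square_pattern_without_base : Prop := ∀ (amplitude : Int) (width : Int) (pattern_icon : String) (space_icon : String), Dom_generate_square_pattern_without_base amplitude width pattern_icon space_icon → Spec_generate_square_pattern_without_base amplitude width pattern_icon space_icon (generate_square_pattern_without_base amplitude width pattern_icon space_icon)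

-- ===== LEMMAS AND PROOFS =====

def pvTop (hw : Int) (p s : String) : String :=
  pvRep s (hw - 2) ++ pvRep p (hw + 1) ++ pvRep s (hw - 2) ++ "\n"
def pvMid (hw : Int) (p s : String) : String :=
  pvRep s (hw - 2) ++ p ++ pvRep s (hw - 1) ++ p ++ pvRep s (hw - 2) ++ "\n"
def pvBot (hw : Int) (p s : String) : String :=
  pvRep p (hw - 1) ++ pvRep s (hw - 1) ++ pvRep p (hw - 1) ++ "\n"

theorem pvRep_zero (s : String) : pvRep s 0 = "" := by
  simp [pvRep, PySem.List.pyRepeat]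

theorem pvRep_one (s : String) : pvRep s 1 = s := by
  simp [pvRep, PySem.List.pyRepeat]

theorem pvRep_succ (s : String) (k : Nat) : pvRep s ((k : Int) + 1) = s ++ pvRep s (k : Int) := by
  have h1 : ((k : Int) + 1).toNat = k + 1 := by omega
  have h2 : ((k : Int)).toNat = k := by omega
  unfold pvRep PySem.List.pyRepeat
  rw [h1, h2, List.replicate_succ, List.flatten_cons]
  simp

theorem pvRep_toNat (s : String) (n : Int) : pvRep s (n.toNat : Int) = pvRep s n := by
  have h : ((n.toNat : Int)).toNat = n.toNat := by omega
  unfold pvRep PySem.List.pyRepeat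
  rw [h]

theorem pvBodyA_zero (a hw : Int) (p s acc : String) :
    pvBodyA a hw p s acc 0 = acc ++ pvTop hw p s := by
  simp [pvBodyA, pvTop, String.append_assoc]

theorem pvBodyA_mid (a hw : Int) (p s acc : String) (i : Int) (h0 : i ≠ 0) (hl : i ≠ a - 1) :
    pvBodyA a hw p s acc i = acc ++ pvMid hw p s := by
  simp only [pvBodyA, pvMid, if_neg h0, if_neg hl]
  rw [show (hw - 2) * (1 - 0) = hw - 2 by ring, show 1 + (hw - 2) * 0 = 1 by ring, pvRep_one]
  simp [String.append_assoc]

theorem pvBodyA_last (a hw : Int) (p s acc : String) (h0 : a - 1 ≠ 0) :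
    pvBodyA a hw p s acc (a - 1) = acc ++ pvBot hw p s := by
  simp only [pvBodyA, pvBot, if_neg h0, if_true]
  rw [show (hw - 2) * (1 - 1) = 0 by ring, show 1 + (hw - 2) * 1 = hw - 1 by ring, pvRep_zero]
  simp [String.append_assoc]

theorem pvFold_mid (a hw : Int) (p s : String) (l : List Int) (acc : String)
    (h : ∀ i ∈ l, i ≠ 0 ∧ i ≠ a - 1) :
    l.foldl (pvBodyA a hw p s) acc = acc ++ pvRep (pvMid hw p s) (l.length : Int) := by
  induction l generalizing acc with
  | nil => simp [pvRep_zero]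
  | cons x xs ih =>
    have hx := h x (List.mem_cons_self)
    rw [List.foldl_cons, pvBodyA_mid a hw p s acc x hx.1 hx.2,
      ih _ (fun i hi => h i (List.mem_cons_of_mem _ hi))]
    rw [List.length_cons, show ((xs.length + 1 : Nat) : Int) = (xs.length : Int) + 1 by push_cast; ring,
      pvRep_succ, String.append_assoc]

-- ===== VERDICT (by name: the statement is the Claim_ definition above) =====
theorem generate_square_pattern_without_base_spec : Claim_equal_generate_square_pattern_without_base := by
  intro amplitude width pattern_icon space_icon _
  unfold Spec_generate_square_pattern_without_base
  unfold generate_square_pattern_without_base generate_square_pattern_without_base_alt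
  set hw := PySem.Int.floordiv width 2 with hhw
  by_cases h0 : amplitude ≤ 0
  · rw [PySem.List.pyRange_one_eq_nil h0]
    simp [h0]
  · by_cases h1 : amplitude = 1
    · subst h1
      rw [PySem.List.pyRange_one_cons (by omega), PySem.List.pyRange_one_eq_nil (by omega)]
      rw [List.foldl_cons, List.foldl_nil, pvBodyA_zero]
      simp [pvTop, String.append_assoc]
    · have h2 : 2 ≤ amplitude := by omega
      have e1 : PySem.List.pyRange 0 amplitude 1 = 0 :: PySem.List.pyRange 1 amplitude 1 :=
        PySem.List.pyRange_one_cons (by omega)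
      have e2 : PySem.List.pyRange 1 amplitude 1
          = PySem.List.pyRange 1 (amplitude - 1) 1 ++ [amplitude - 1] := by
        have := PySem.List.pyRange_one_succ_right (a := 1) (b := amplitude - 1) (by omega)
        rw [show amplitude - 1 + 1 = amplitude by ring] at this
        exact this
      rw [e1, e2, List.foldl_cons, List.foldl_append, pvBodyA_zero]
      rw [pvFold_mid amplitude hw pattern_icon space_icon (PySem.List.pyRange 1 (amplitude - 1) 1)
        ("" ++ pvTop hw pattern_icon space_icon)
        (fun i hi => by
          have := (PySem.List.mem_pyRange_one).1 hi
          omega)]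
      rw [List.foldl_cons, List.foldl_nil, pvBodyA_last amplitude hw pattern_icon space_icon _ (by omega)]
      rw [PySem.List.length_pyRange_one, show amplitude - 1 - 1 = amplitude - 2 by ring, pvRep_toNat]
      simp only [if_neg h0, if_neg h1]
      simp [pvTop, pvMid, pvBot, String.append_assoc]
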